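-- pv_equiv track=rewrite | github.com/phongnickchinh/autotool | core/downloadTool/get_link.py | _clean_href
-- ===== SOURCE A (Python) =====
-- def _clean_href(href: str) -> str:
--     if not href:
--         return ''
--     if href.startswith('/watch'):  # relative path case
--         href = 'https://www.youtube.com' + href
--     # remove typical noise params
--     cut_tokens = ['&pp=ygU', '&start_radio=1', '&list=']
--     for token in cut_tokens:
--         if token in href:
--             href = href.split(token)[0]
--     return href
-- ===== SOURCE B (Python) =====
-- def _clean_href(href: str) -> str:
--     if not href:
--         return ''
--     if href.startswith('/watch'):  # relative path case
--         href = 'https://www.youtube.com' + href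
--     # earliest noise-param delimiter, then truncate once
--     positions = [p for p in (href.find(t) for t in ('&pp=ygU', '&start_radio=1', '&list=')) if p != -1]
--     if positions:
--         href = href[:min(positions)]
--     return href
-- ===== Notes on version B (the rewrite author's own statement) =====
-- stated objective: alternative
-- what changed: Instead of repeatedly splitting and reassigning href once per noise token, B computes href.find for each token in one pass, keeps the positions that are not -1, and truncates href once at the minimum such position.
import Mathlib
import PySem

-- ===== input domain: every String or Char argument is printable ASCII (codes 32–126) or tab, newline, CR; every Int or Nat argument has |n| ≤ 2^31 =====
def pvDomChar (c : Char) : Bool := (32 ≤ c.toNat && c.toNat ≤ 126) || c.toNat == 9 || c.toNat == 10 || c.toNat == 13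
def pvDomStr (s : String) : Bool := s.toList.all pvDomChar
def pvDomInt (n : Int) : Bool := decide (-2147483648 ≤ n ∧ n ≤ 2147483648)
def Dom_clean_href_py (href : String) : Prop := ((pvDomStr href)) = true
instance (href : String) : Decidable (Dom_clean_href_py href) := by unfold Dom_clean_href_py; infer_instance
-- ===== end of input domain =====

-- B replaces A's repeated split-and-reassign loop by one pass collecting find positions and a single truncation at their minimum (objective: alternative decomposition, same cost).

-- ===== PORT A =====
def clean_href_py (href : String) : String :=
  if href == "" then ""
  else
    let href1 := if PySem.Str.startswith href "/watch" then "https://www.youtube.com" ++ href else href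
    let cut_tokens : List String := ["&pp=ygU", "&start_radio=1", "&list="]
    cut_tokens.foldl (fun h token =>
      if PySem.Str.isIn token h then
        -- href.split(token)[0]: token ≠ "" so split? is some, and Python split always returns a nonempty list, so index 0 exists
        (PySem.List.pyGet? ((PySem.Str.split? h token).getD []) 0).getD ""
      else h) href1

-- ===== PORT B =====
def clean_href_py_alt (href : String) : String :=
  if href == "" then ""
  else
    let href1 := if PySem.Str.startswith href "/watch" then "https://www.youtube.com" ++ href else href
    let positions := (([ "&pp=ygU", "&start_radio=1", "&list=" ] : List String).map
        (fun t => PySem.Str.find href1 t)).filter (fun p => p != -1)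
    match PySem.List.min? positions id with
    | some m => PySem.Str.slice href1 none (some m)
    | none => href1

-- ===== PRECONDITION & SPEC =====
def Spec_clean_href_py (href : String) (out : String) : Prop := out = clean_href_py_alt href
instance (href : String) (out : String) : Decidable (Spec_clean_href_py href out) := by unfold Spec_clean_href_py; infer_instance

-- ===== CLAIM (what is proved, stated in full; the proofs are below) =====
def Claim_equal_clean_href_py : Prop := ∀ (href : String), Dom_clean_href_py href → Spec_clean_href_py href (clean_href_py href)

-- ===== LEMMAS AND PROOFS =====

-- Python's s.split(sep)[0]: the piece of l before the first occurrence of sep (all of l if absent)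
def pvCutList (sep : List Char) : List Char → List Char
  | [] => []
  | c :: rest => if sep.isPrefixOf (c :: rest) then [] else c :: pvCutList sep rest

-- a noise token: nonempty, and '&' occurs exactly at position 0 (so a cut at a token start never lands inside another token's occurrence)
def pvAmp (t : List Char) : Prop := t ≠ [] ∧ ∀ i, (h : i < t.length) → (t[i] = '&' ↔ i = 0)

-- one step of A's loop, at the character-list level
def pvFcut (t l : List Char) : List Char :=
  if PySem.Chars.find l t = -1 then l else l.take (PySem.Chars.find l t).toNat

def pvSeqCut (toks : List (List Char)) (l : List Char) : List Char :=
  toks.foldl (fun s t => pvFcut t s) l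

-- B's computation at the character-list level
def pvCutMin (toks : List (List Char)) (l : List Char) : List Char :=
  match PySem.List.min? ((toks.map (fun t => PySem.Chars.find l t)).filter (fun p => p != -1)) id with
  | some m => l.take m.toNat
  | none => l

theorem pvMinAux (f : Option Int → Int → Option Int)
    (hf1 : ∀ x, f none x = some x)
    (hf2 : ∀ a x, f (some a) x = if x < a then some x else some a)
    (xs : List Int) (acc : Option Int) (m : Int)
    (h : xs.foldl f acc = some m) :
    (acc = some m ∨ m ∈ xs) ∧ (∀ x ∈ xs, m ≤ x) ∧ (∀ a, acc = some a → m ≤ a) := by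
  induction xs generalizing acc with
  | nil =>
    simp only [List.foldl_nil] at h
    exact ⟨Or.inl h, by simp, fun a ha => by simp_all⟩
  | cons x xs ih =>
    simp only [List.foldl_cons] at h
    obtain ⟨h1, h2, h3⟩ := ih _ h
    match hacc : acc with
    | none =>
      rw [hf1] at h1 h3
      have hmx : m ≤ x := h3 x rfl
      refine ⟨Or.inr ?_, ?_, by simp⟩
      · rcases h1 with h1 | h1
        · simp only [Option.some.injEq] at h1; simp [h1]
        · exact List.mem_cons_of_mem _ h1
      · intro y hy
        rcases List.mem_cons.1 hy with rfl | hy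
        · exact hmx
        · exact h2 y hy
    | some a =>
      rw [hf2] at h1 h3
      by_cases hlt : x < a
      · rw [if_pos hlt] at h1 h3
        have hmx : m ≤ x := h3 x rfl
        refine ⟨Or.inr ?_, ?_, fun b hb => ?_⟩
        · rcases h1 with h1 | h1
          · simp only [Option.some.injEq] at h1; simp [h1]
          · exact List.mem_cons_of_mem _ h1
        · intro y hy
          rcases List.mem_cons.1 hy with rfl | hy
          · exact hmx
          · exact h2 y hy
        · simp only [Option.some.injEq] at hb; omega
      · rw [if_neg hlt] at h1 h3
        have hma : m ≤ a := h3 a rfl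
        refine ⟨?_, ?_, fun b hb => ?_⟩
        · rcases h1 with h1 | h1
          · exact Or.inl h1
          · exact Or.inr (List.mem_cons_of_mem _ h1)
        · intro y hy
          rcases List.mem_cons.1 hy with rfl | hy
          · omega
          · exact h2 y hy
        · simp only [Option.some.injEq] at hb; omega

theorem pvMin?_spec {m : Int} {xs : List Int} (h : PySem.List.min? xs id = some m) :
    m ∈ xs ∧ ∀ x ∈ xs, m ≤ x := by
  unfold PySem.List.min? at h
  obtain ⟨h1, h2, _⟩ := pvMinAux _ (fun x => rfl) (fun a x => rfl) xs none m h
  refine ⟨?_, h2⟩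
  rcases h1 with h1 | h1
  · exact absurd h1 (by simp)
  · exact h1

theorem pvMinSomeAux (f : Option Int → Int → Option Int)
    (hf2 : ∀ a x, f (some a) x = if x < a then some x else some a)
    (xs : List Int) (a : Int) : xs.foldl f (some a) ≠ none := by
  induction xs generalizing a with
  | nil => simp
  | cons x xs ih =>
    simp only [List.foldl_cons, hf2]
    split <;> exact ih _

theorem pvMin?_none {xs : List Int} : PySem.List.min? xs id = none ↔ xs = [] := by
  constructor
  · intro h
    cases xs with
    | nil => rfl
    | cons x xs =>
      unfold PySem.List.min? at h
      simp only [List.foldl_cons] at h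
      exact absurd h (pvMinSomeAux _ (fun a x => rfl) xs x)
  · rintro rfl; rfl

theorem pvPrefix_take {u w : List Char} {n : Nat} (h : u <+: w) (hn : u.length ≤ n) :
    u <+: w.take n := List.prefix_take_iff.2 ⟨h, hn⟩

theorem pvPrefix_of_take_drop {u w : List Char} {p i : Nat} (h : u <+: (w.take p).drop i) :
    u <+: w.drop i := by
  rw [List.drop_take] at h
  exact (List.prefix_take_iff.1 h).1

-- find is characterised by first occurrence
theorem pvFind_eq_of {s sub : List Char} {j : Nat} (h : sub <+: s.drop j)
    (hmin : ∀ i < j, ¬ sub <+: s.drop i) : PySem.Chars.find s sub = (j : Int) := by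
  have hin : PySem.Chars.isIn sub s = true :=
    (PySem.Chars.exists_prefix_drop_iff_isIn sub s).1 ⟨j, h⟩
  have hne : PySem.Chars.find s sub ≠ -1 :=
    (PySem.Chars.find_ne_neg_one_iff s sub).2 ((PySem.Chars.isIn_iff_infix sub s).1 hin)
  have hle : -1 ≤ PySem.Chars.find s sub := PySem.Chars.neg_one_le_find s sub
  have h0 : 0 ≤ PySem.Chars.find s sub := by omega
  obtain ⟨hocc, hmin'⟩ := PySem.Chars.find_spec h0
  rcases Nat.lt_trichotomy (PySem.Chars.find s sub).toNat j with hlt | heq | hgt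
  · exact absurd hocc (hmin _ hlt)
  · omega
  · exact absurd h (hmin' j hgt)

theorem pvFind_none_of {s sub : List Char} (h : ∀ i, ¬ sub <+: s.drop i) :
    PySem.Chars.find s sub = -1 := by
  by_contra hne
  have hin := (PySem.Chars.find_ne_neg_one_iff s sub).1 hne
  obtain ⟨j, hj⟩ := (PySem.Chars.exists_prefix_drop_iff_isIn sub s).2
    ((PySem.Chars.isIn_iff_infix sub s).2 hin)
  exact h j hj

-- the crux: truncating at the first occurrence of token t changes find for token u predictably
theorem pvFindTake {t u l : List Char} (ht : pvAmp t) (hu : pvAmp u)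
    (hp : PySem.Chars.find l t ≠ -1) :
    PySem.Chars.find (l.take (PySem.Chars.find l t).toNat) u =
      (if PySem.Chars.find l u ≠ -1 ∧ PySem.Chars.find l u < PySem.Chars.find l t
       then PySem.Chars.find l u else -1) := by
  obtain ⟨htne, htamp⟩ := ht
  obtain ⟨hune, huamp⟩ := hu
  have hle : -1 ≤ PySem.Chars.find l t := PySem.Chars.neg_one_le_find l t
  have hp0 : 0 ≤ PySem.Chars.find l t := by omega
  obtain ⟨hocct, _⟩ := PySem.Chars.find_spec hp0
  set p := (PySem.Chars.find l t).toNat with hpdef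
  have htlen : 0 < t.length := List.length_pos_iff.2 htne
  have hplen : p < l.length := by
    have hl := hocct.length_le
    simp only [List.length_drop] at hl
    omega
  have hlp : l[p]'hplen = '&' := by
    have h0 := List.IsPrefix.getElem hocct (i := 0) (by omega)
    rw [List.getElem_drop] at h0
    have h1 : t[0]'(by omega) = '&' := (htamp 0 (by omega)).2 rfl
    rw [h1] at h0
    simpa using h0.symm
  by_cases hq : PySem.Chars.find l u ≠ -1 ∧ PySem.Chars.find l u < PySem.Chars.find l t
  · have hqle : -1 ≤ PySem.Chars.find l u := PySem.Chars.neg_one_le_find l u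
    have hq0 : 0 ≤ PySem.Chars.find l u := by omega
    obtain ⟨hoccu, hminu⟩ := PySem.Chars.find_spec hq0
    set q := (PySem.Chars.find l u).toNat with hqdef
    have hqp : q < p := by omega
    have hfit : q + u.length ≤ p := by
      by_contra hcon
      have hidx : p - q < u.length := by omega
      have h1 : u[p - q]'hidx = l[p]'hplen := by
        have h2 := List.IsPrefix.getElem hoccu (i := p - q) hidx
        rw [h2, List.getElem_drop]
        congr 1
        omega
      have h3 := (huamp (p - q) hidx).1 (by rw [h1, hlp])
      omega
    have hfound : PySem.Chars.find (l.take p) u = (q : Int) := by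
      apply pvFind_eq_of
      · rw [List.drop_take]
        exact pvPrefix_take hoccu (by omega)
      · intro i hi hocc
        exact hminu i hi (pvPrefix_of_take_drop hocc)
    rw [if_pos hq, hfound]
    omega
  · rw [if_neg hq]
    apply pvFind_none_of
    intro i hocc'
    have hocc : u <+: l.drop i := pvPrefix_of_take_drop hocc'
    have hne : PySem.Chars.find l u ≠ -1 :=
      (PySem.Chars.find_ne_neg_one_iff l u).2 ((PySem.Chars.isIn_iff_infix u l).1
        ((PySem.Chars.exists_prefix_drop_iff_isIn u l).1 ⟨i, hocc⟩))
    have hqle : -1 ≤ PySem.Chars.find l u := PySem.Chars.neg_one_le_find l u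
    have hq0 : 0 ≤ PySem.Chars.find l u := by omega
    obtain ⟨_, hminu⟩ := PySem.Chars.find_spec hq0
    have hig : (PySem.Chars.find l u).toNat ≤ i := by
      by_contra hcon
      exact hminu i (by omega) hocc
    have hip : p ≤ i := by omega
    have hul := hocc'.length_le
    simp only [List.length_drop, List.length_take] at hul
    have : u.length = 0 := by omega
    exact hune (List.length_eq_zero_iff.1 this)

theorem pvFilterIf (p : Int) (xs : List Int) :
    (xs.map (fun x => if x ≠ -1 ∧ x < p then x else -1)).filter (fun y => y != -1)
      = xs.filter (fun x => decide (x ≠ -1 ∧ x < p)) := by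
  induction xs with
  | nil => simp
  | cons x xs ih =>
    by_cases hc : x ≠ -1 ∧ x < p
    · simp only [List.map_cons, List.filter_cons, if_pos hc]
      rw [ih]
      simp [hc]
    · simp only [List.map_cons, List.filter_cons, if_neg hc]
      rw [ih]
      simp [hc]

theorem pvStep {t : List Char} {ts : List (List Char)} (ht : pvAmp t)
    (hts : ∀ u ∈ ts, pvAmp u) (l : List Char) :
    pvCutMin ts (pvFcut t l) = pvCutMin (t :: ts) l := by
  by_cases hp : PySem.Chars.find l t = -1
  · unfold pvFcut pvCutMin
    rw [if_pos hp]
    simp [hp]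
  · have hple : -1 ≤ PySem.Chars.find l t := PySem.Chars.neg_one_le_find l t
    have hp0 : 0 ≤ PySem.Chars.find l t := by omega
    unfold pvFcut pvCutMin
    rw [if_neg hp]
    have hmap : ts.map (fun u => PySem.Chars.find (l.take (PySem.Chars.find l t).toNat) u)
        = (ts.map (fun u => PySem.Chars.find l u)).map
            (fun x => if x ≠ -1 ∧ x < PySem.Chars.find l t then x else -1) := by
      rw [List.map_map]
      apply List.map_congr_left
      intro u hu
      simpa using pvFindTake ht (hts u hu) hp
    rw [hmap, pvFilterIf]
    set p := PySem.Chars.find l t with hpd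
    set L := ts.map (fun u => PySem.Chars.find l u) with hL
    have hmapc : (t :: ts).map (fun u => PySem.Chars.find l u) = p :: L := by
      simp [hL, hpd]
    rw [hmapc]
    have hpcons : ((p :: L).filter (fun y => y != -1)) = p :: L.filter (fun y => y != -1) := by
      simp only [List.filter_cons]
      rw [if_pos (by simpa using hp)]
    rw [hpcons]
    set F := L.filter (fun y => y != -1) with hF
    set F' := L.filter (fun x => decide (x ≠ -1 ∧ x < p)) with hF'
    have hFpos : ∀ x ∈ F, 0 ≤ x ∧ x ≠ -1 := by
      intro x hx
      obtain ⟨hxL, hxne⟩ := List.mem_filter.1 hx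
      obtain ⟨u, _, rfl⟩ := List.mem_map.1 hxL
      have := PySem.Chars.neg_one_le_find l u
      simp only [bne_iff_ne, ne_eq] at hxne
      exact ⟨by omega, hxne⟩
    have hF'sub : ∀ x ∈ F', x ∈ F ∧ x < p := by
      intro x hx
      obtain ⟨hxL, hxc⟩ := List.mem_filter.1 hx
      simp only [decide_eq_true_eq] at hxc
      exact ⟨List.mem_filter.2 ⟨hxL, by simpa using hxc.1⟩, hxc.2⟩
    cases hm1 : PySem.List.min? (p :: F) id with
    | none => exact absurd (pvMin?_none.1 hm1) (by simp)
    | some m1 =>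
      obtain ⟨hm1mem, hm1le⟩ := pvMin?_spec hm1
      cases hm2 : PySem.List.min? F' id with
      | none =>
        have hFnil : F' = [] := pvMin?_none.1 hm2
        have hge : ∀ x ∈ F, p ≤ x := by
          intro x hx
          obtain ⟨hx0, hxne⟩ := hFpos x hx
          have hxL := (List.mem_filter.1 hx).1
          by_contra hcon
          have : x ∈ F' := List.mem_filter.2 ⟨hxL, by simp [hxne]; omega⟩
          rw [hFnil] at this
          exact absurd this (List.not_mem_nil)
        have hm1p : m1 = p := by
          rcases List.mem_cons.1 hm1mem with rfl | hmem
          · rfl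
          · have := hge m1 hmem
            have := hm1le p (List.mem_cons_self)
            omega
        rw [hm1p]
      | some m2 =>
        obtain ⟨hm2mem, hm2le⟩ := pvMin?_spec hm2
        obtain ⟨hm2F, hm2p⟩ := hF'sub m2 hm2mem
        have hm1m2 : m1 ≤ m2 := hm1le m2 (List.mem_cons_of_mem _ hm2F)
        have hm1F : m1 ∈ F := by
          rcases List.mem_cons.1 hm1mem with rfl | hmem
          · omega
          · exact hmem
        have hm2m1 : m2 ≤ m1 := by
          apply hm2le
          apply List.mem_filter.2
          refine ⟨(List.mem_filter.1 hm1F).1, ?_⟩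
          have := (hFpos m1 hm1F).2
          simp [this]
          omega
        have heq : m2 = m1 := by omega
        have h0 : 0 ≤ m2 := by have := hFpos m2 hm2F; omega
        show List.take m2.toNat (List.take (PySem.Chars.find l t).toNat l) = List.take m1.toNat l
        rw [List.take_take, heq]
        congr 1
        omega

theorem pvSeq (toks : List (List Char)) (h : ∀ u ∈ toks, pvAmp u) (l : List Char) :
    pvSeqCut toks l = pvCutMin toks l := by
  induction toks generalizing l with
  | nil => rfl
  | cons t ts ih =>
    have hstep : pvSeqCut (t :: ts) l = pvSeqCut ts (pvFcut t l) := rfl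
    rw [hstep, ih (fun u hu => h u (List.mem_cons_of_mem _ hu)),
      pvStep (h t List.mem_cons_self) (fun u hu => h u (List.mem_cons_of_mem _ hu))]

-- splitOn head
theorem pvGoAcc (sep : List Char) (fuel : Nat) (l cur : List Char) (acc : List (List Char)) :
    PySem.Chars.splitOn.go sep fuel l cur acc
      = acc.reverse ++ PySem.Chars.splitOn.go sep fuel l cur [] := by
  induction fuel generalizing l cur acc with
  | zero => simp [PySem.Chars.splitOn.go]
  | succ fuel ih =>
    cases l with
    | nil => simp [PySem.Chars.splitOn.go]
    | cons c rest =>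
      rw [PySem.Chars.splitOn.go, PySem.Chars.splitOn.go]
      by_cases hpre : sep.isPrefixOf (c :: rest) = true
      · rw [if_pos hpre, if_pos hpre, ih _ _ (cur.reverse :: acc), ih _ _ [cur.reverse]]
        simp
      · rw [if_neg hpre, if_neg hpre, ih rest (c :: cur) acc]

theorem pvGoHead (sep : List Char) (fuel : Nat) (l cur : List Char) (hf : l.length < fuel) :
    (PySem.Chars.splitOn.go sep fuel l cur []).head? = some (cur.reverse ++ pvCutList sep l) := by
  induction fuel generalizing l cur with
  | zero => omega
  | succ fuel ih =>
    cases l with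
    | nil => simp [PySem.Chars.splitOn.go, pvCutList]
    | cons c rest =>
      rw [PySem.Chars.splitOn.go]
      by_cases hpre : sep.isPrefixOf (c :: rest) = true
      · rw [if_pos hpre, pvGoAcc]
        simp [pvCutList, hpre]
      · rw [if_neg hpre, ih rest (c :: cur) (by simpa using hf)]
        simp [pvCutList, hpre]

theorem pvSplitOn_head (sep l : List Char) :
    (PySem.Chars.splitOn l sep).head? = some (pvCutList sep l) := by
  unfold PySem.Chars.splitOn
  rw [pvGoHead sep (l.length + 1) l [] (by omega)]
  simp

theorem pvCutList_no_occ {sep : List Char} (l : List Char)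
    (h : ∀ i, ¬ sep <+: l.drop i) : pvCutList sep l = l := by
  induction l with
  | nil => rfl
  | cons c rest ih =>
    have hpre : sep.isPrefixOf (c :: rest) = false := by
      rw [Bool.eq_false_iff]
      intro hc
      exact h 0 (by simpa using List.isPrefixOf_iff_prefix.1 hc)
    rw [pvCutList, hpre]
    simp only [Bool.false_eq_true, if_false]
    rw [ih (fun i => by simpa using h (i + 1))]

theorem pvCutList_spec {sep : List Char} (hsep : sep ≠ []) (l : List Char) (p : Nat)
    (hocc : sep <+: l.drop p) (hmin : ∀ i < p, ¬ sep <+: l.drop i) :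
    pvCutList sep l = l.take p := by
  induction l generalizing p with
  | nil =>
    simp only [List.drop_nil] at hocc
    exact absurd (List.prefix_nil.1 hocc) hsep
  | cons c rest ih =>
    by_cases hpre : sep.isPrefixOf (c :: rest) = true
    · have hp0 : p = 0 := by
        by_contra hne
        exact hmin 0 (by omega) (by simpa using List.isPrefixOf_iff_prefix.1 hpre)
      rw [pvCutList, hpre, hp0]
      simp
    · have hp0 : p ≠ 0 := by
        rintro rfl
        exact hpre (List.isPrefixOf_iff_prefix.2 (by simpa using hocc))
      obtain ⟨j, rfl⟩ : ∃ j, p = j + 1 := ⟨p - 1, by omega⟩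
      rw [pvCutList, Bool.eq_false_iff.2 hpre]
      simp only [Bool.false_eq_true, if_false]
      rw [ih j (by simpa using hocc) (fun i hi => by simpa using hmin (i + 1) (by omega))]
      rfl

theorem pvCut_eq_fcut {sep : List Char} (hsep : sep ≠ []) (l : List Char) :
    pvCutList sep l = pvFcut sep l := by
  unfold pvFcut
  by_cases hf : PySem.Chars.find l sep = -1
  · rw [if_pos hf]
    apply pvCutList_no_occ
    intro i hocc
    have := (PySem.Chars.exists_prefix_drop_iff_isIn sep l).1 ⟨i, hocc⟩
    rw [(PySem.Chars.isIn_iff_infix sep l)] at this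
    exact (PySem.Chars.find_eq_neg_one_iff l sep).1 hf this
  · rw [if_neg hf]
    have hle : -1 ≤ PySem.Chars.find l sep := PySem.Chars.neg_one_le_find l sep
    have h0 : 0 ≤ PySem.Chars.find l sep := by omega
    obtain ⟨hocc, hmin⟩ := PySem.Chars.find_spec h0
    exact pvCutList_spec hsep l _ hocc hmin

-- one step of A's string-level loop
theorem pvStepA (h tok : String) (htok : tok ≠ "") :
    (if PySem.Str.isIn tok h then
        (PySem.List.pyGet? ((PySem.Str.split? h tok).getD []) 0).getD ""
      else h).toList = pvFcut tok.toList h.toList := by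
  have htokl : tok.toList ≠ [] := by
    intro hc
    exact htok (String.toList_inj.1 (by simpa using hc))
  by_cases hin : PySem.Str.isIn tok h = true
  · rw [if_pos hin]
    have hfind : PySem.Chars.find h.toList tok.toList ≠ -1 := by
      rw [PySem.Str.isIn_eq] at hin
      unfold PySem.Chars.isIn at hin
      simpa using hin
    have hmap := PySem.Str.split?_map h tok
    have hsplit : PySem.Chars.split? h.toList tok.toList
        = some (PySem.Chars.splitOn h.toList tok.toList) := by
      simp [PySem.Chars.split?, htokl]
    cases hsp : PySem.Str.split? h tok with
    | none => rw [hsp, hsplit] at hmap; simp at hmap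
    | some parts =>
      rw [hsp, hsplit] at hmap
      simp only [Option.map_some, Option.some.injEq] at hmap
      have hhead := pvSplitOn_head tok.toList h.toList
      rw [← hmap] at hhead
      cases parts with
      | nil => simp at hhead
      | cons w ps =>
        simp only [List.map_cons, List.head?_cons, Option.some.injEq] at hhead
        have hget : PySem.List.pyGet? (w :: ps) (0 : Int) = some w := by
          exact_mod_cast PySem.List.pyGet?_natCast (w :: ps) 0
        simp only [Option.getD_some, hget]
        rw [hhead, pvCut_eq_fcut htokl]
  · rw [if_neg hin]
    have hfind : PySem.Chars.find h.toList tok.toList = -1 := by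
      rw [PySem.Str.isIn_eq] at hin
      unfold PySem.Chars.isIn at hin
      simpa using hin
    unfold pvFcut
    rw [if_pos hfind]

-- ===== VERDICT (by name: the statement is the Claim_ definition above) =====
theorem pvAmpToks : ∀ u ∈ ["&pp=ygU".toList, "&start_radio=1".toList, "&list=".toList], pvAmp u := by
  intro u hu
  unfold pvAmp
  fin_cases hu
  · exact ⟨by decide, by decide⟩
  · exact ⟨by decide, by decide⟩
  · exact ⟨by decide, by decide⟩

theorem clean_href_py_spec : Claim_equal_clean_href_py := by
  intro href _
  unfold Spec_clean_href_py clean_href_py clean_href_py_alt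
  by_cases hemp : (href == "") = true
  · rw [if_pos hemp, if_pos hemp]
  · rw [if_neg hemp, if_neg hemp]
    simp only []
    set h1 := if PySem.Str.startswith href "/watch" then "https://www.youtube.com" ++ href else href with hh1
    apply String.toList_inj.1
    have hA : (List.foldl (fun h token => if PySem.Str.isIn token h then
          (PySem.List.pyGet? ((PySem.Str.split? h token).getD []) 0).getD "" else h)
        h1 ["&pp=ygU", "&start_radio=1", "&list="]).toList
        = pvSeqCut ["&pp=ygU".toList, "&start_radio=1".toList, "&list=".toList] h1.toList := by
      simp only [List.foldl_cons, List.foldl_nil]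
      rw [pvStepA _ "&list=" (by decide), pvStepA _ "&start_radio=1" (by decide),
        pvStepA _ "&pp=ygU" (by decide)]
      rfl
    have hmapS : ((["&pp=ygU", "&start_radio=1", "&list="] : List String).map
          (fun t => PySem.Str.find h1 t))
        = (["&pp=ygU".toList, "&start_radio=1".toList, "&list=".toList].map
          (fun t => PySem.Chars.find h1.toList t)) := by
      simp [PySem.Str.find_eq]
    have hB : (match PySem.List.min? (((["&pp=ygU", "&start_radio=1", "&list="] : List String).map
          (fun t => PySem.Str.find h1 t)).filter (fun p => p != -1)) id with
        | some m => PySem.Str.slice h1 none (some m)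
        | none => h1).toList
        = pvCutMin ["&pp=ygU".toList, "&start_radio=1".toList, "&list=".toList] h1.toList := by
      rw [hmapS]
      unfold pvCutMin
      cases hmin : PySem.List.min? ((["&pp=ygU".toList, "&start_radio=1".toList, "&list=".toList].map
          (fun t => PySem.Chars.find h1.toList t)).filter (fun p => p != -1)) id with
      | none => rfl
      | some m =>
        obtain ⟨hmem, _⟩ := pvMin?_spec hmin
        obtain ⟨hmL, hmne⟩ := List.mem_filter.1 hmem
        obtain ⟨u, _, rfl⟩ := List.mem_map.1 hmL
        have hge : -1 ≤ PySem.Chars.find h1.toList u := PySem.Chars.neg_one_le_find h1.toList u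
        have h0 : 0 ≤ PySem.Chars.find h1.toList u := by
          simp only [bne_iff_ne, ne_eq] at hmne
          omega
        show (PySem.Str.slice h1 none (some _)).toList = _
        rw [PySem.Str.toList_slice, PySem.Chars.slice_eq_listSlice, PySem.List.slice_to _ h0]
    rw [hA, hB]
    exact pvSeq _ pvAmpToks h1.toList
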